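-- pv_equiv track=rewrite | github.com/ianjones02/BINF_6112_Final | src/msaligner/back_translation (1).py | back_translate_single_sequence
-- ===== SOURCE A (Python) =====
-- def back_translate_single_sequence(aligned_aa: str, original_orf_nt: str) -> str:
--     """
--     Back-translate a single aligned amino acid sequence to nucleotides.
--
--     Args:
--         aligned_aa: Aligned amino acid sequence (with gaps)
--         original_orf_nt: Original nucleotide ORF sequence
--
--     Returns:
--         Aligned nucleotide sequence
--     """
--     aligned_nt = []
--     aa_pos = 0
--     nt_pos = 0
--
--     for aa_char in aligned_aa:
--         if aa_char == '-':
--             # Insert gap in nucleotide alignment (3 nucleotides per codon)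
--             aligned_nt.extend(['-', '-', '-'])
--         else:
--             if aa_char == 'X' or nt_pos + 3 > len(original_orf_nt):
--                 # Handle ambiguous amino acids or boundary issues
--                 aligned_nt.extend(['N', 'N', 'N'])
--             else:
--                 # Use original codon
--                 codon = original_orf_nt[nt_pos:nt_pos+3]
--                 aligned_nt.extend(list(codon))
--             nt_pos += 3
--             aa_pos += 1
--
--     return ''.join(aligned_nt)
-- ===== SOURCE B (Python) =====
-- def back_translate_single_sequence(aligned_aa: str, original_orf_nt: str) -> str:
--     # Staged pipeline: filter residues, build codon table, pair by zip, merge gaps back.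
--     residues = [c for c in aligned_aa if c != '-']
--     codons = [original_orf_nt[j:j+3] for j in range(0, len(original_orf_nt) // 3 * 3, 3)]
--     codons += [''] * (len(residues) - len(codons))
--     trans = ['NNN' if c == 'X' or cod == '' else cod for c, cod in zip(residues, codons)]
--     it = iter(trans)
--     return ''.join('---' if c == '-' else next(it) for c in aligned_aa)
-- ===== Notes on version B (the rewrite author's own statement) =====
-- stated objective: alternative
-- what changed: B is a staged pipeline - filter out the gap characters, build the full-codon table, pair residues with codons by zip (padding with empty strings), and merge the gap structure back by consuming the translated list as an iterator - instead of A's single pass that slices the nucleotide string at a running nt_pos with an arithmetic boundary check per character.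
import Mathlib
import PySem

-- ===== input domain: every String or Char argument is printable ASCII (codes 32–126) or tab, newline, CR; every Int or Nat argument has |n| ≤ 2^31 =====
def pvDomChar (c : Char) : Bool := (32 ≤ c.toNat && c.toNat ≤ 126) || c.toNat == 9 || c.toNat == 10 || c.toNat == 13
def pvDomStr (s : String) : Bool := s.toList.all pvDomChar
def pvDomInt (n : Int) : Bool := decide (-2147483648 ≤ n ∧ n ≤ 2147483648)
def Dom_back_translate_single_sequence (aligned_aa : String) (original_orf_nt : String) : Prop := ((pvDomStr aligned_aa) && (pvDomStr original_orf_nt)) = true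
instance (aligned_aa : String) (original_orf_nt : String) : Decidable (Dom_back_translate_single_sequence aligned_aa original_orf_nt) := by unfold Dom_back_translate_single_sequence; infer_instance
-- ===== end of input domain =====

-- B replaces A's single pass with a running nt_pos by a staged pipeline
-- (filter residues, codon table, zip-translate, merge gaps back): objective
-- 'alternative' — a different decomposition at the same cost.

-- ===== PORT A =====
-- loop body of A: state = (aligned_nt, aa_pos, nt_pos)
def pvStepA (nt : List Char) (st : List Char × Int × Int) (ch : Char) : List Char × Int × Int :=
  if ch = '-' then
    (st.1 ++ ['-', '-', '-'], st.2.1, st.2.2)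
  else if ch = 'X' ∨ st.2.2 + 3 > (nt.length : Int) then
    (st.1 ++ ['N', 'N', 'N'], st.2.1 + 1, st.2.2 + 3)
  else
    (st.1 ++ PySem.List.slice nt (some st.2.2) (some (st.2.2 + 3)), st.2.1 + 1, st.2.2 + 3)

def back_translate_single_sequence (aligned_aa : String) (original_orf_nt : String) : String :=
  String.ofList (aligned_aa.toList.foldl (pvStepA original_orf_nt.toList) ([], 0, 0)).1

-- ===== PORT B =====
-- codons = [nt[j:j+3] for j in range(0, len(nt) // 3 * 3, 3)]
def pvCodonTable (nt : List Char) : List (List Char) :=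
  (PySem.List.pyRange 0 ((nt.length / 3 * 3 : Nat) : Int) 3).map
    (fun j => PySem.List.slice nt (some j) (some (j + 3)))

-- ''.join('---' if c == '-' else next(it) for c in aligned_aa): the iterator over
-- trans is consumed structurally; next(it) never runs past the end (trans has one
-- entry per non-gap character), so headD/tail render it exactly on these inputs
def pvMerge : List Char → List (List Char) → List (List Char)
  | [], _ => []
  | c :: cs, ts =>
    if c = '-' then ['-', '-', '-'] :: pvMerge cs ts
    else ts.headD [] :: pvMerge cs ts.tail

def back_translate_single_sequence_alt (aligned_aa : String) (original_orf_nt : String) : String :=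
  let residues := aligned_aa.toList.filter (fun c => c ≠ '-')
  let codons := pvCodonTable original_orf_nt.toList
  let padded := codons ++ List.replicate (residues.length - codons.length) []
  let trans := (residues.zip padded).map
    (fun p => if p.1 = 'X' ∨ p.2 = [] then ['N', 'N', 'N'] else p.2)
  String.ofList (pvMerge aligned_aa.toList trans).flatten

-- ===== PRECONDITION & SPEC =====
def Spec_back_translate_single_sequence (aligned_aa : String) (original_orf_nt : String) (out : String) : Prop := out = back_translate_single_sequence_alt aligned_aa original_orf_nt
instance (aligned_aa : String) (original_orf_nt : String) (out : String) : Decidable (Spec_back_translate_single_sequence aligned_aa original_orf_nt out) := by unfold Spec_back_translate_single_sequence; infer_instance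

-- ===== CLAIM (what is proved, stated in full; the proofs are below) =====
def Claim_equal_back_translate_single_sequence : Prop := ∀ (aligned_aa : String) (original_orf_nt : String), Dom_back_translate_single_sequence aligned_aa original_orf_nt → Spec_back_translate_single_sequence aligned_aa original_orf_nt (back_translate_single_sequence aligned_aa original_orf_nt)

-- ===== LEMMAS AND PROOFS =====

-- common specification: codon pieces of both programs, one piece per character,
-- i counting the non-gap characters already consumed
def pvSpecG (nt : List Char) : List Char → Nat → List (List Char)
  | [], _ => []
  | c :: cs, i =>
    if c = '-' then ['-', '-', '-'] :: pvSpecG nt cs i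
    else (if c = 'X' ∨ nt.length < 3 * i + 3 then ['N', 'N', 'N']
          else (nt.drop (3 * i)).take 3) :: pvSpecG nt cs (i + 1)

-- pieces for the non-gap characters only (what B's `trans` list must equal)
def pvTransSpec (nt : List Char) : List Char → Nat → List (List Char)
  | [], _ => []
  | c :: cs, i =>
    if c = '-' then pvTransSpec nt cs i
    else (if c = 'X' ∨ nt.length < 3 * i + 3 then ['N', 'N', 'N']
          else (nt.drop (3 * i)).take 3) :: pvTransSpec nt cs (i + 1)

lemma pv_A_eq_specG (nt : List Char) (cs : List Char) (acc : List Char) (p : Int) (i : Nat) :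
    (cs.foldl (pvStepA nt) (acc, p, ((3 * i : Nat) : Int))).1
      = acc ++ (pvSpecG nt cs i).flatten := by
  induction cs generalizing acc p i with
  | nil => simp [pvSpecG]
  | cons c cs ih =>
      simp only [List.foldl_cons]
      by_cases hg : c = '-'
      · rw [show pvStepA nt (acc, p, ((3 * i : Nat) : Int)) c
              = (acc ++ ['-','-','-'], p, ((3 * i : Nat) : Int)) by simp [pvStepA, hg]]
        rw [ih]
        simp [pvSpecG, hg]
      · by_cases hn : c = 'X' ∨ nt.length < 3 * i + 3
        · have hn' : c = 'X' ∨ ((3 * i : Nat) : Int) + 3 > (nt.length : Int) := by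
            rcases hn with h | h
            · exact Or.inl h
            · right; push_cast; omega
          rw [show pvStepA nt (acc, p, ((3 * i : Nat) : Int)) c
                = (acc ++ ['N','N','N'], p + 1, ((3 * (i + 1) : Nat) : Int)) by
              simp only [pvStepA, if_neg hg, if_pos hn']
              refine congrArg _ (congrArg _ ?_); push_cast; ring]
          rw [ih]
          simp [pvSpecG, hg, hn]
        · have hn' : ¬ (c = 'X' ∨ ((3 * i : Nat) : Int) + 3 > (nt.length : Int)) := by
            rintro (h | h)
            · exact hn (Or.inl h)
            · exact hn (Or.inr (by push_cast at h; omega))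
          have hslice : PySem.List.slice nt (some ((3 * i : Nat) : Int))
                (some (((3 * i : Nat) : Int) + 3)) = (nt.drop (3 * i)).take 3 := by
            rw [show (((3 * i : Nat) : Int) + 3) = (((3 * i + 3 : Nat) : Int)) by push_cast; ring]
            rw [PySem.List.slice_natCast]
            congr 1
            omega
          rw [show pvStepA nt (acc, p, ((3 * i : Nat) : Int)) c
                = (acc ++ (nt.drop (3 * i)).take 3, p + 1, ((3 * (i + 1) : Nat) : Int)) by
              simp only [pvStepA, if_neg hg, if_neg hn', hslice]
              refine congrArg _ (congrArg _ ?_); push_cast; ring]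
          rw [ih]
          simp [pvSpecG, hg, hn]

lemma pv_merge_transSpec (nt : List Char) (cs : List Char) (i : Nat) :
    pvMerge cs (pvTransSpec nt cs i) = pvSpecG nt cs i := by
  induction cs generalizing i with
  | nil => simp [pvMerge, pvSpecG]
  | cons c cs ih =>
      by_cases hg : c = '-'
      · simp [pvMerge, pvSpecG, pvTransSpec, hg, ih]
      · simp [pvMerge, pvSpecG, pvTransSpec, hg, ih]

-- the padded codon table: entry k is the k-th full codon, or [] past the end
lemma pv_codonTable_length (nt : List Char) :
    (pvCodonTable nt).length = nt.length / 3 := by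
  unfold pvCodonTable
  rw [PySem.List.pyRange_of_pos 0 ((nt.length / 3 * 3 : Nat) : Int) (by norm_num)]
  simp only [List.length_map, List.length_range]
  by_cases h : (0 : Int) < ((nt.length / 3 * 3 : Nat) : Int)
  · rw [if_pos h]
    have hm : 0 < nt.length / 3 := by
      by_contra hc
      apply absurd h
      push_cast
      omega
    push_cast
    omega
  · rw [if_neg h]
    push_cast at h
    omega

lemma pv_codonTable_get? (nt : List Char) (k : Nat) (hk : k < nt.length / 3) :
    (pvCodonTable nt)[k]? = some ((nt.drop (3 * k)).take 3) := by
  unfold pvCodonTable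
  rw [PySem.List.pyRange_of_pos 0 ((nt.length / 3 * 3 : Nat) : Int) (by norm_num)]
  have hcnt : (if (0 : Int) < ((nt.length / 3 * 3 : Nat) : Int)
      then ((((nt.length / 3 * 3 : Nat) : Int) - 0 + 3 - 1) / 3).toNat else 0) = nt.length / 3 := by
    rw [if_pos (by push_cast; omega)]
    push_cast
    omega
  rw [hcnt]
  rw [List.getElem?_map, List.getElem?_map, List.getElem?_range hk]
  simp only [Option.map_some]
  congr 1
  rw [show ((0 : Int) + 3 * (k : Int)) = ((3 * k : Nat) : Int) by push_cast; ring]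
  rw [show ((3 * k : Nat) : Int) + 3 = ((3 * k + 3 : Nat) : Int) by push_cast; ring]
  rw [PySem.List.slice_natCast]
  congr 1
  omega

lemma pv_padded_get (nt : List Char) (pad : Nat) (k : Nat)
    (hk : k < (pvCodonTable nt ++ List.replicate pad ([] : List Char)).length) :
    (pvCodonTable nt ++ List.replicate pad ([] : List Char))[k]
      = if 3 * k + 3 ≤ nt.length then (nt.drop (3 * k)).take 3 else [] := by
  have hct := pv_codonTable_length nt
  by_cases h : k < (pvCodonTable nt).length
  · rw [List.getElem_append_left h, if_pos (by omega)]
    have := pv_codonTable_get? nt k (by omega)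
    have h2 : (pvCodonTable nt)[k]? = some (pvCodonTable nt)[k] := List.getElem?_eq_getElem h
    rw [h2] at this
    exact Option.some.inj this
  · rw [List.getElem_append_right (by omega)]
    rw [List.getElem_replicate, if_neg (by omega)]

-- B's zip/map translation of the residue stream equals the per-character pieces
lemma pv_zip_eq_transSpec (nt : List Char) (padded : List (List Char))
    (hpad : ∀ k (hk : k < padded.length),
      padded[k] = if 3 * k + 3 ≤ nt.length then (nt.drop (3 * k)).take 3 else [])
    (cs : List Char) (i : Nat)
    (hle : i + (cs.filter (fun c => c ≠ '-')).length ≤ padded.length) :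
    (((cs.filter (fun c => c ≠ '-')).zip (padded.drop i)).map
        (fun p => if p.1 = 'X' ∨ p.2 = [] then ['N', 'N', 'N'] else p.2))
      = pvTransSpec nt cs i := by
  induction cs generalizing i with
  | nil => simp [pvTransSpec]
  | cons c cs ih =>
      by_cases hg : c = '-'
      · have hfil : (c :: cs).filter (fun c => c ≠ '-') = cs.filter (fun c => c ≠ '-') := by
          simp [hg]
        rw [hfil] at hle ⊢
        rw [pvTransSpec, if_pos hg]
        exact ih i hle
      · have hfil : (c :: cs).filter (fun c => c ≠ '-') = c :: cs.filter (fun c => c ≠ '-') := by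
          simp [hg]
        rw [hfil] at hle ⊢
        simp only [List.length_cons] at hle
        have hi : i < padded.length := by omega
        rw [List.drop_eq_getElem_cons hi]
        rw [List.zip_cons_cons, List.map_cons]
        rw [pvTransSpec, if_neg hg]
        congr 1
        · rw [hpad i hi]
          by_cases hb : 3 * i + 3 ≤ nt.length
          · rw [if_pos hb]
            have hne : (nt.drop (3 * i)).take 3 ≠ [] := by
              intro hc
              have h1 := congrArg List.length hc
              simp only [List.length_take, List.length_drop, List.length_nil] at h1
              omega
            by_cases hx : c = 'X'
            · rw [if_pos (Or.inl hx), if_pos (Or.inl hx)]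
            · rw [if_neg (by rintro (h | h); exact hx h; exact hne h),
                  if_neg (by rintro (h | h); exact hx h; omega)]
          · rw [if_neg hb]
            rw [if_pos (Or.inr rfl), if_pos (Or.inr (by omega))]
        · exact ih (i + 1) (by omega)

-- ===== VERDICT (by name: the statement is the Claim_ definition above) =====
theorem back_translate_single_sequence_spec : Claim_equal_back_translate_single_sequence := by
  intro aligned_aa original_orf_nt _
  unfold Spec_back_translate_single_sequence
  unfold back_translate_single_sequence back_translate_single_sequence_alt
  simp only []  -- beta-reduce the let-bindings of the B port
  have hA := pv_A_eq_specG original_orf_nt.toList aligned_aa.toList [] 0 0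
  simp only [Nat.mul_zero, Nat.cast_zero, List.nil_append] at hA
  rw [hA]
  have htrans := pv_zip_eq_transSpec original_orf_nt.toList
      (pvCodonTable original_orf_nt.toList ++
        List.replicate ((aligned_aa.toList.filter (fun c => c ≠ '-')).length -
          (pvCodonTable original_orf_nt.toList).length) ([] : List Char))
      (pv_padded_get original_orf_nt.toList _)
      aligned_aa.toList 0
      (by simp only [List.length_append, List.length_replicate]; omega)
  rw [List.drop_zero] at htrans
  rw [htrans, pv_merge_transSpec]
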